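-- pv_equiv track=rewrite | github.com/acoustic0422/problem_solve | Programmers/2021/210506/[3차] 방금그곡.py | string_to_note_list
-- ===== SOURCE A (Python) =====
-- def string_to_note_list(melody):
--     mel = []
--     note = ''
--     for c in melody:
--         if c == '#':
--             note += c
--             mel.append(note)
--             note = ''
--         else:
--             if note != '':
--                 mel.append(note)
--                 note = c
--             else:
--                 note += c
--     if note != '':
--         mel.append(note)
--
--     return mel
-- ===== SOURCE B (Python) =====
-- def string_to_note_list(melody):
--     res = []
--     i = 0
--     n = len(melody)
--     while i < n:
--         if melody[i] != '#' and i + 1 < n and melody[i + 1] == '#':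
--             res.append(melody[i:i + 2])
--             i += 2
--         else:
--             res.append(melody[i])
--             i += 1
--     return res
-- ===== Notes on version B (the rewrite author's own statement) =====
-- stated objective: alternative
-- what changed: Replaces A's accumulate-and-flush state machine (a growing note buffer flushed on '#' or on the next char) with a stateless one-pass lookahead scan that emits each token directly, consuming two characters when a non-'#' is followed by '#'.
import Mathlib
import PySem

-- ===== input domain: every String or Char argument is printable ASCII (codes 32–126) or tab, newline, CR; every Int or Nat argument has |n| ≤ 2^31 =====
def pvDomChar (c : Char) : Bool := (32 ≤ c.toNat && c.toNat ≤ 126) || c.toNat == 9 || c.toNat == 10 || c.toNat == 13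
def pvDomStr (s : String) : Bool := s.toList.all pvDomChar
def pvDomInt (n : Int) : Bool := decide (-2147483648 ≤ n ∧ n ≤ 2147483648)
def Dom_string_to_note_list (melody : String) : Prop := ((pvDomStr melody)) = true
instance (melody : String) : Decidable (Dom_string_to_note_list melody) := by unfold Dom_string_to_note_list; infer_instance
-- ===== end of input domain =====

-- B replaces A's accumulate-and-flush state machine with a stateless one-pass lookahead scan (alternative decomposition, same cost).

-- ===== PORT A =====
-- A's loop: strings modelled as List Char (note += c  ↦  note ++ [c]); state = (mel, note)
def pvALoop : List Char → List (List Char) → List Char → List (List Char)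
  | [], mel, note => if note ≠ [] then mel ++ [note] else mel
  | c :: cs, mel, note =>
    if c = '#' then pvALoop cs (mel ++ [note ++ ['#']]) []
    else if note ≠ [] then pvALoop cs (mel ++ [note]) [c]
    else pvALoop cs mel (note ++ [c])

def string_to_note_list (melody : String) : List String :=
  (pvALoop melody.toList [] []).map String.ofList

-- ===== PORT B =====
-- B's while loop with lookahead: at each position emit 2 chars if melody[i] ≠ '#' and melody[i+1] == '#', else 1
def pvBScan : List Char → List (List Char)
  | [] => []
  | [c] => [[c]]
  | c :: d :: rest =>
    if c ≠ '#' ∧ d = '#' then [c, d] :: pvBScan rest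
    else [c] :: pvBScan (d :: rest)

def string_to_note_list_alt (melody : String) : List String :=
  (pvBScan melody.toList).map String.ofList

-- ===== PRECONDITION & SPEC =====
def Spec_string_to_note_list (melody : String) (out : List String) : Prop := out = string_to_note_list_alt melody
instance (melody : String) (out : List String) : Decidable (Spec_string_to_note_list melody out) := by unfold Spec_string_to_note_list; infer_instance

-- ===== CLAIM (what is proved, stated in full; the proofs are below) =====
def Claim_equal_string_to_note_list : Prop := ∀ (melody : String), Dom_string_to_note_list melody → Spec_string_to_note_list melody (string_to_note_list melody)

-- ===== LEMMAS AND PROOFS =====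
theorem pvALoop_acc (cs : List Char) : ∀ (mel : List (List Char)) (note : List Char),
    pvALoop cs mel note = mel ++ pvALoop cs [] note := by
  induction cs with
  | nil => intro mel note; simp [pvALoop]; split_ifs <;> simp
  | cons c cs ih =>
    intro mel note
    simp only [pvALoop]
    split_ifs with h1 h2
    · simp only [List.nil_append]
      rw [ih (mel ++ [note ++ ['#']]), ih [note ++ ['#']]]; simp
    · simp only [List.nil_append]
      rw [ih (mel ++ [note]), ih [note]]; simp
    · rw [ih mel, ih []]

theorem pvBScan_hash_cons (cs : List Char) : pvBScan ('#' :: cs) = ['#'] :: pvBScan cs := by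
  cases cs <;> simp [pvBScan]

theorem pvALoop_eq_pvBScan (cs : List Char) :
    pvALoop cs [] [] = pvBScan cs ∧ ∀ c, c ≠ '#' → pvALoop cs [] [c] = pvBScan (c :: cs) := by
  induction cs with
  | nil => exact ⟨by simp [pvALoop, pvBScan], fun c _ => by simp [pvALoop, pvBScan]⟩
  | cons c cs ih =>
    constructor
    · by_cases h : c = '#'
      · subst h
        simp only [pvALoop, if_pos]
        rw [pvALoop_acc, ih.1, pvBScan_hash_cons]; simp
      · simp only [pvALoop, if_neg h]
        simpa using ih.2 c h
    · intro d hd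
      by_cases h : c = '#'
      · subst h
        simp only [pvALoop, if_pos]
        rw [pvALoop_acc, ih.1]
        simp [pvBScan, hd]
      · simp only [pvALoop, if_neg h]
        have : ([d] : List Char) ≠ [] := by simp
        rw [if_pos this, pvALoop_acc, ih.2 c h]
        simp [pvBScan, h]

-- ===== VERDICT (by name: the statement is the Claim_ definition above) =====
theorem string_to_note_list_spec : Claim_equal_string_to_note_list := by
  intro melody _
  unfold Spec_string_to_note_list string_to_note_list string_to_note_list_alt
  rw [(pvALoop_eq_pvBScan melody.toList).1]
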